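-- pv_equiv track=rewrite | github.com/DayChan/lc | Pythoncode/44.通配符匹配.py | deldupstar
-- ===== SOURCE A (Python) =====
-- def deldupstar(p):
--     i = 0
--     j = 0
--     p = list(p)
--     while j < len(p):
--         if p[j] != "*":
--             p[i] = p[j]
--             i += 1
--             j += 1
--         else:
--             if j+1 >= len(p) or p[j+1] != "*":
--                 p[i] = p[j]
--                 i += 1
--                 j += 1
--             else:
--                 j += 1
--     return "".join(p[:i])
-- ===== SOURCE B (Python) =====
-- def deldupstar(p):
--     # Stage 1: split p into maximal runs of identical characters.
--     runs = []
--     cur = ""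
--     for c in p:
--         if cur and cur[0] == c:
--             cur += c
--         else:
--             if cur:
--                 runs.append(cur)
--             cur = c
--     if cur:
--         runs.append(cur)
--     # Stage 2: emit each run, collapsing star runs to a single star.
--     return "".join("*" if r[0] == "*" else r for r in runs)
-- ===== Notes on version B (the rewrite author's own statement) =====
-- stated objective: alternative
-- what changed: Replaced the two-pointer in-place compaction by a staged group-then-map algorithm: first split the pattern into maximal runs of identical characters, then rebuild the string collapsing each star run to a single star and keeping other runs unchanged.
import Mathlib
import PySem

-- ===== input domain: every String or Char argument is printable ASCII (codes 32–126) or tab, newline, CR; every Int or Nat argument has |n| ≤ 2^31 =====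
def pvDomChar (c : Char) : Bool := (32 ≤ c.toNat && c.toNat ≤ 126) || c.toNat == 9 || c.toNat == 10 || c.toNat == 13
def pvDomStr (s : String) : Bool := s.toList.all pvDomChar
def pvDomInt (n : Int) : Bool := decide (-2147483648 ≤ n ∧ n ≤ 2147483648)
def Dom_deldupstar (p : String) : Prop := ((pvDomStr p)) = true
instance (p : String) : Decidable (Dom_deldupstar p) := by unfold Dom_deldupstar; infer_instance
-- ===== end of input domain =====

-- B replaces A's two-pointer compaction by a staged group-then-map pass (split into
-- maximal runs, collapse star runs to one star); objective: alternative, same cost.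

-- ===== PORT A =====
-- A's while loop: state is the mutable list `lst` and the write/read indices i, j.
def deldupstarLoop (lst : List Char) (i j : Nat) : List Char :=
  if h : j < lst.length then
    if lst[j] ≠ '*' then
      deldupstarLoop (lst.set i lst[j]) (i+1) (j+1)
    else if j+1 ≥ lst.length ∨ lst[j+1]? ≠ some '*' then
      deldupstarLoop (lst.set i lst[j]) (i+1) (j+1)
    else
      deldupstarLoop lst i (j+1)
  else
    lst.take i
termination_by lst.length - j
decreasing_by
  · simp only [List.length_set]; omega
  · simp only [List.length_set]; omega
  · omega

def deldupstar (p : String) : String := String.mk (deldupstarLoop p.toList 0 0)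

-- ===== PORT B =====
-- Stage-1 step of Source B's for loop: state = (finished runs, current run `cur`);
-- extend `cur` when the character repeats its first one, otherwise close it.
def runStep (st : List (List Char) × List Char) (c : Char) : List (List Char) × List Char :=
  if st.2 ≠ [] ∧ st.2.head? = some c then (st.1, st.2 ++ [c])
  else ((if st.2 ≠ [] then st.1 ++ [st.2] else st.1), [c])

-- Stage-2 emit: a run starting with '*' becomes a single '*', others are kept.
def runEmit (r : List Char) : List Char :=
  if r.head? = some '*' then ['*'] else r

def deldupstar_alt (p : String) : String :=
  let st := p.toList.foldl runStep ([], [])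
  let runs := if st.2 ≠ [] then st.1 ++ [st.2] else st.1
  String.mk (runs.flatMap runEmit)

-- ===== PRECONDITION & SPEC =====
def Spec_deldupstar (p : String) (out : String) : Prop := out = deldupstar_alt p
instance (p : String) (out : String) : Decidable (Spec_deldupstar p out) := by unfold Spec_deldupstar; infer_instance

-- ===== CLAIM (what is proved, stated in full; the proofs are below) =====
def Claim_equal_deldupstar : Prop := ∀ (p : String), Dom_deldupstar p → Spec_deldupstar p (deldupstar p)

-- ===== LEMMAS AND PROOFS =====

-- Canonical look-ahead collapse: drop a '*' whose successor is also '*'.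
def gCollapse : List Char → List Char
  | [] => []
  | c :: rest =>
    if c = '*' ∧ rest.head? = some '*' then gCollapse rest else c :: gCollapse rest

theorem take_succ_set {α : Type} : ∀ (l : List α) (i : Nat) (c : α), i < l.length →
    (l.set i c).take (i+1) = l.take i ++ [c] := by
  intro l
  induction l with
  | nil => intro i c h; simp at h
  | cons a t ih =>
    intro i c h
    cases i with
    | zero => simp
    | succ i =>
      simp only [List.set_cons_succ, List.take_succ_cons]
      rw [ih i c (by simpa using h)]
      simp

theorem loop_eq (n : Nat) : ∀ (lst : List Char) (i j : Nat), lst.length - j = n → i ≤ j →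
    deldupstarLoop lst i j = lst.take i ++ gCollapse (lst.drop j) := by
  induction n with
  | zero =>
    intro lst i j hn hij
    rw [deldupstarLoop, dif_neg (by omega), List.drop_eq_nil_of_le (by omega)]
    simp [gCollapse]
  | succ n ih =>
    intro lst i j hn hij
    have hj : j < lst.length := by omega
    have hdrop : lst.drop j = lst[j] :: lst.drop (j+1) := List.drop_eq_getElem_cons hj
    have hhead : (lst.drop (j+1)).head? = lst[j+1]? := List.head?_drop
    have hset_take : ∀ c : Char, (lst.set i c).take (i+1) = lst.take i ++ [c] :=
      fun c => take_succ_set lst i c (by omega)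
    have hset_drop : ∀ c : Char, (lst.set i c).drop (j+1) = lst.drop (j+1) := by
      intro c
      rw [List.drop_set, if_pos (by omega)]
    rw [deldupstarLoop, dif_pos hj]
    by_cases hc : lst[j] = '*'
    · rw [if_neg (by simp [hc])]
      by_cases hnext : j+1 ≥ lst.length ∨ lst[j+1]? ≠ some '*'
      · rw [if_pos hnext]
        rw [ih (lst.set i lst[j]) (i+1) (j+1) (by simp; omega) (by omega)]
        rw [hset_take, hset_drop, hdrop]
        simp only [gCollapse, hhead]
        rw [if_neg (by
          rintro ⟨-, h2⟩
          rcases hnext with h1 | h1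
          · rw [List.getElem?_eq_none (by omega)] at h2
            simp at h2
          · exact h1 h2)]
        simp
      · rw [if_neg hnext]
        rcases not_or.mp hnext with ⟨h1, h2⟩
        rw [ih lst i (j+1) (by omega) (by omega), hdrop]
        simp only [gCollapse, hhead]
        rw [if_pos ⟨hc, not_not.mp h2⟩]
    · rw [if_pos (by simp [hc])]
      rw [ih (lst.set i lst[j]) (i+1) (j+1) (by simp; omega) (by omega)]
      rw [hset_take, hset_drop, hdrop]
      simp only [gCollapse, hhead]
      rw [if_neg (by simp [hc])]
      simp

-- Back-to-front grouping into maximal runs, via merging a run into a run list.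
def mergeRun (cur : List Char) : List (List Char) → List (List Char)
  | [] => [cur]
  | r :: rs => if r.head? = cur.head? then (cur ++ r) :: rs else cur :: r :: rs

def runsR : List Char → List (List Char)
  | [] => []
  | c :: rest => mergeRun [c] (runsR rest)

theorem mergeRun_ne_nil (cur : List Char) (gs : List (List Char)) : mergeRun cur gs ≠ [] := by
  cases gs with
  | nil => simp [mergeRun]
  | cons r rs =>
    simp only [mergeRun]
    split_ifs <;> simp

theorem mergeRun_head (cur : List Char) (gs : List (List Char)) (r : List Char)
    (rs : List (List Char)) (hc : cur ≠ []) (h : mergeRun cur gs = r :: rs) :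
    r.head? = cur.head? := by
  cases gs with
  | nil =>
    simp only [mergeRun] at h
    injection h with h1 h2
    rw [← h1]
  | cons g gs' =>
    simp only [mergeRun] at h
    split_ifs at h with hh
    · injection h with h1 _
      subst h1
      cases cur with
      | nil => exact absurd rfl hc
      | cons a t => simp
    · injection h with h1 _
      subst h1
      rfl

theorem runsR_head : ∀ (l : List Char) (r : List Char) (rs : List (List Char)),
    runsR l = r :: rs → r.head? = l.head? := by
  intro l r rs h
  cases l with
  | nil => simp [runsR] at h
  | cons c rest =>
    simp only [runsR] at h
    rw [mergeRun_head [c] (runsR rest) r rs (by simp) h]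
    simp

theorem runsR_nil : ∀ (l : List Char), runsR l = [] → l = [] := by
  intro l h
  cases l with
  | nil => rfl
  | cons c rest => exact absurd h (mergeRun_ne_nil [c] (runsR rest))

-- Forward grouping as Source B's loop performs it, carrying the open run `cur`.
def runsAux (cur : List Char) : List Char → List (List Char)
  | [] => if cur = [] then [] else [cur]
  | c :: rest =>
    if cur ≠ [] ∧ cur.head? = some c then runsAux (cur ++ [c]) rest
    else if cur = [] then runsAux [c] rest
    else cur :: runsAux [c] rest

theorem runsAux_merge : ∀ (l : List Char) (cur : List Char), cur ≠ [] →
    runsAux cur l = mergeRun cur (runsR l) := by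
  intro l
  induction l with
  | nil => intro cur hc; simp [runsAux, runsR, mergeRun, hc]
  | cons c rest ih =>
    intro cur hc
    by_cases hh : cur.head? = some c
    · rw [runsAux, if_pos ⟨hc, hh⟩, ih (cur ++ [c]) (by simp)]
      have hheq : (cur ++ [c]).head? = some c := by
        cases cur with
        | nil => exact absurd rfl hc
        | cons a t => simpa using hh
      simp only [runsR]
      cases hg : runsR rest with
      | nil => simp [mergeRun, hh]
      | cons r rs =>
        simp only [mergeRun, hheq]
        by_cases h1 : r.head? = some c
        · simp [h1, hh, List.append_assoc]
        · simp [h1, hh]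
    · rw [runsAux, if_neg (by rintro ⟨-, h⟩; exact hh h), if_neg hc, ih [c] (by simp)]
      simp only [runsR]
      cases hg : mergeRun [c] (runsR rest) with
      | nil => exact absurd hg (mergeRun_ne_nil _ _)
      | cons r rs =>
        have hr : r.head? = some c := by simpa using mergeRun_head [c] (runsR rest) r rs (by simp) hg
        rw [mergeRun, if_neg (by rw [hr]; exact fun h => hh h.symm)]

theorem runsAux_nil_eq : ∀ (l : List Char), runsAux [] l = runsR l := by
  intro l
  cases l with
  | nil => simp [runsAux, runsR]
  | cons c rest =>
    rw [runsAux, if_neg (by simp), if_pos rfl, runsAux_merge rest [c] (by simp)]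
    rfl

-- Source B's loop: fold of runStep computes the forward grouping.
theorem foldl_runStep : ∀ (l : List Char) (runs : List (List Char)) (cur : List Char),
    (let st := l.foldl runStep (runs, cur)
     if st.2 ≠ [] then st.1 ++ [st.2] else st.1) = runs ++ runsAux cur l := by
  intro l
  induction l with
  | nil =>
    intro runs cur
    by_cases hc : cur = [] <;> simp [runsAux, hc]
  | cons c rest ih =>
    intro runs cur
    simp only [List.foldl]
    by_cases h : cur ≠ [] ∧ cur.head? = some c
    · rw [runStep, if_pos h]
      rw [show runsAux cur (c :: rest) = runsAux (cur ++ [c]) rest from by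
        rw [runsAux, if_pos h]]
      exact ih runs (cur ++ [c])
    · rw [runStep, if_neg h]
      by_cases hc : cur = []
      · rw [show runsAux cur (c :: rest) = runsAux [c] rest from by
          rw [runsAux, if_neg h, if_pos hc]]
        rw [show (if cur ≠ [] then runs ++ [cur] else runs) = runs from by
          rw [if_neg (by simp [hc])]]
        exact ih runs [c]
      · rw [show runsAux cur (c :: rest) = cur :: runsAux [c] rest from by
          rw [runsAux, if_neg h, if_neg hc]]
        rw [show (if cur ≠ [] then runs ++ [cur] else runs) = runs ++ [cur] from if_pos hc]
        simpa using ih (runs ++ [cur]) [c]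

-- Emitting the runs realises the look-ahead collapse.
theorem flatMap_runEmit : ∀ (l : List Char), (runsR l).flatMap runEmit = gCollapse l := by
  intro l
  induction l with
  | nil => simp [runsR, gCollapse]
  | cons c rest ih =>
    simp only [runsR]
    cases hg : runsR rest with
    | nil =>
      have : rest = [] := runsR_nil rest hg
      subst this
      by_cases hc : c = '*' <;> simp [mergeRun, runEmit, gCollapse, hc]
    | cons r rs =>
      have hr : r.head? = rest.head? := runsR_head rest r rs hg
      rw [hg] at ih
      by_cases hcr : r.head? = some c
      · rw [mergeRun, if_pos (by simpa using hcr)]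
        by_cases hc : c = '*'
        · subst hc
          have hrest : rest.head? = some '*' := hr ▸ hcr
          rw [gCollapse, if_pos ⟨rfl, hrest⟩, ← ih]
          simp only [List.flatMap_cons, List.singleton_append]
          rw [show runEmit ('*' :: r) = ['*'] from by simp [runEmit],
              show runEmit r = ['*'] from by simp [runEmit, hcr]]
        · rw [gCollapse, if_neg (by rintro ⟨h, -⟩; exact hc h), ← ih]
          simp only [List.flatMap_cons, List.singleton_append]
          rw [show runEmit (c :: r) = c :: r from by
                simp only [runEmit]; rw [if_neg (by simp [hc])],
              show runEmit r = r from by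
                simp only [runEmit]; rw [if_neg (by rw [hcr]; simp [hc])]]
          simp
      · rw [mergeRun, if_neg (by simpa using hcr)]
        have hrest : ¬ (c = '*' ∧ rest.head? = some '*') := by
          rintro ⟨rfl, h⟩
          exact hcr (hr.trans h)
        rw [gCollapse, if_neg hrest, ← ih]
        simp only [List.flatMap_cons]
        by_cases hc : c = '*' <;> simp [runEmit, hc]

-- ===== VERDICT (by name: the statement is the Claim_ definition above) =====
theorem deldupstar_spec : Claim_equal_deldupstar := by
  intro p _
  unfold Spec_deldupstar deldupstar deldupstar_alt
  rw [loop_eq (p.toList.length) p.toList 0 0 (by omega) (le_refl 0)]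
  simp only [List.take_zero, List.drop_zero, List.nil_append]
  have h := foldl_runStep p.toList [] []
  simp only [List.nil_append] at h
  rw [runsAux_nil_eq] at h
  simp only [h, flatMap_runEmit]
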